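-- pv_equiv track=rewrite | github.com/SSH1007/Algorithm | 백준/Bronze/9664. NASLJEDSTVO/NASLJEDSTVO.py | F
-- ===== SOURCE A (Python) =====
-- def F(N, O):
--     min_x = None
--     max_x = None
--     for q in range(1, O + 1):
--         x = O + q
--         if x // N == q:
--             if min_x is None or x < min_x:
--                 min_x = x
--             if max_x is None or x > max_x:
--                 max_x = x
--     return min_x, max_x
-- ===== SOURCE B (Python) =====
-- def F(N, O):
--     # Closed form: for N >= 2 the condition (O+q)//N == q is the integer
--     # inequality q*(N-1) <= O < q*(N-1) + N, i.e. lo <= q <= hi below;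
--     # candidates x = O + q are increasing in q, so only the endpoints matter.
--     if O < 1 or N < 2:
--         return (None, None)
--     lo = (O - N) // (N - 1) + 1
--     hi = O // (N - 1)
--     q1 = max(lo, 1)
--     q2 = min(hi, O)
--     if q1 > q2:
--         return (None, None)
--     return (O + q1, O + q2)
-- ===== Notes on version B (the rewrite author's own statement) =====
-- stated objective: faster
-- what changed: Replaced the O(O) scan over q=1..O by a closed-form solution of the inequality q*(N-1) <= O < q*(N-1)+N, picking the interval endpoints.
import Mathlib
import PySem

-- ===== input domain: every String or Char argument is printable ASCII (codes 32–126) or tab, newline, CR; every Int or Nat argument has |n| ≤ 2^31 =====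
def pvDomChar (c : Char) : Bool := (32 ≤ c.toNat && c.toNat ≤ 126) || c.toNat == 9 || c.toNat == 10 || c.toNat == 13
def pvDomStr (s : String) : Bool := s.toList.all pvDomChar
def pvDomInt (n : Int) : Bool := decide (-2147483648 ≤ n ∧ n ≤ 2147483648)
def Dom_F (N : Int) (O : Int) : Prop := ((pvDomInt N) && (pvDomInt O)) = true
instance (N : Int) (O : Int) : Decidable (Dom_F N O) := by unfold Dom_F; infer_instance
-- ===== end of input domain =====

-- B replaces A's linear scan over q = 1..O by an O(1) closed-form solution of
-- the inequality q*(N-1) ≤ O < q*(N-1)+N (objective: faster, asymptotic).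

-- ===== PORT A =====
-- loop body of A's for-loop (min/max update), named for the proofs
def stepA (N : Int) (O : Int) (st : Option Int × Option Int) (q : Int) :
    Option Int × Option Int :=
  let x := O + q
  if PySem.Int.floordiv x N = q then
    ((match st.1 with
      | none => some x
      | some m => if x < m then some x else some m),
     (match st.2 with
      | none => some x
      | some m => if x > m then some x else some m))
  else st

def F (N : Int) (O : Int) : List (Option Int) :=
  let r := (PySem.List.pyRange 1 (O + 1) 1).foldl (stepA N O) (none, none)
  [r.1, r.2]

-- ===== PORT B =====
def F_alt (N : Int) (O : Int) : List (Option Int) :=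
  if O < 1 || N < 2 then [none, none]
  else
    let lo := PySem.Int.floordiv (O - N) (N - 1) + 1
    let hi := PySem.Int.floordiv O (N - 1)
    let q1 := max lo 1
    let q2 := min hi O
    if q1 > q2 then [none, none]
    else [some (O + q1), some (O + q2)]

-- ===== PRECONDITION & SPEC =====
-- Pre_ excludes only N = 0 with O ≥ 1, where A raises ZeroDivisionError.
def Pre_F (N : Int) (O : Int) : Prop := ¬ (N = 0 ∧ 1 ≤ O)
instance (N : Int) (O : Int) : Decidable (Pre_F N O) := by unfold Pre_F; infer_instance
def pvWitness_F : Int × Int := (3, 10)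

def Spec_F (N : Int) (O : Int) (out : List (Option Int)) : Prop := out = F_alt N O
instance (N : Int) (O : Int) (out : List (Option Int)) : Decidable (Spec_F N O out) := by unfold Spec_F; infer_instance

-- ===== CLAIM (what is proved, stated in full; the proofs are below) =====
def Claim_equal_F : Prop := ∀ (N : Int) (O : Int), Dom_F N O → Pre_F N O → Spec_F N O (F N O)

-- ===== LEMMAS AND PROOFS =====

-- A's two conditional updates, as standalone option-min / option-max folds
def omin (st : Option Int) (x : Int) : Option Int :=
  match st with
  | none => some x
  | some m => if x < m then some x else some m

def omax (st : Option Int) (x : Int) : Option Int :=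
  match st with
  | none => some x
  | some m => if x > m then some x else some m

theorem foldl_stepA (N O : Int) (l : List Int) (mn mx : Option Int) :
    l.foldl (stepA N O) (mn, mx) =
      (((l.filter (fun q => decide (PySem.Int.floordiv (O + q) N = q))).map
          (fun q => O + q)).foldl omin mn,
       ((l.filter (fun q => decide (PySem.Int.floordiv (O + q) N = q))).map
          (fun q => O + q)).foldl omax mx) := by
  induction l generalizing mn mx with
  | nil => simp
  | cons q l ih =>
    by_cases h : PySem.Int.floordiv (O + q) N = q
    · simp only [List.foldl_cons, stepA, List.filter_cons, h, decide_true, if_true,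
        List.map_cons]
      rw [ih]
      rfl
    · simp only [List.foldl_cons, stepA, List.filter_cons, h, decide_false, if_false]
      exact ih mn mx

theorem foldl_omin_some (l : List Int) (a : Int) :
    l.foldl omin (some a) = some (l.foldl min a) := by
  induction l generalizing a with
  | nil => rfl
  | cons x l ih =>
    have hmin : omin (some a) x = some (min a x) := by
      simp only [omin]
      rcases lt_or_ge x a with h | h
      · rw [if_pos h, min_eq_right h.le]
      · rw [if_neg (not_lt.mpr h), min_eq_left h]
    simp only [List.foldl_cons, hmin, ih]

theorem foldl_omax_some (l : List Int) (a : Int) :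
    l.foldl omax (some a) = some (l.foldl max a) := by
  induction l generalizing a with
  | nil => rfl
  | cons x l ih =>
    have hmax : omax (some a) x = some (max a x) := by
      simp only [omax]
      rcases lt_or_ge a x with h | h
      · rw [if_pos h, max_eq_right h.le]
      · rw [if_neg (not_lt.mpr h), max_eq_left h]
    simp only [List.foldl_cons, hmax, ih]

theorem foldl_min_eq_of (l : List Int) (a m : Int) (h1 : m = a ∨ m ∈ l)
    (h2 : m ≤ a) (h3 : ∀ x ∈ l, m ≤ x) : l.foldl min a = m := by
  induction l generalizing a with
  | nil =>
    simp only [List.foldl_nil]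
    rcases h1 with h | h
    · omega
    · simp at h
  | cons x l ih =>
    have hmx : m ≤ x := h3 x (by simp)
    have h3' : ∀ y ∈ l, m ≤ y := fun y hy => h3 y (by simp [hy])
    rw [List.foldl_cons]
    rcases h1 with h | hm
    · subst h
      exact ih (min m x) (Or.inl (min_eq_left hmx).symm) (le_min (le_refl m) hmx) h3'
    · rcases List.mem_cons.mp hm with h | hm
      · subst h
        exact ih (min a m) (Or.inl (min_eq_right h2).symm) (le_min h2 (le_refl m)) h3'
      · exact ih (min a x) (Or.inr hm) (le_min h2 hmx) h3' 

theorem foldl_max_eq_of (l : List Int) (a m : Int) (h1 : m = a ∨ m ∈ l)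
    (h2 : a ≤ m) (h3 : ∀ x ∈ l, x ≤ m) : l.foldl max a = m := by
  induction l generalizing a with
  | nil =>
    simp only [List.foldl_nil]
    rcases h1 with h | h
    · omega
    · simp at h
  | cons x l ih =>
    have hmx : x ≤ m := h3 x (by simp)
    have h3' : ∀ y ∈ l, y ≤ m := fun y hy => h3 y (by simp [hy])
    rw [List.foldl_cons]
    rcases h1 with h | hm
    · subst h
      exact ih (max m x) (Or.inl (max_eq_left hmx).symm) (max_le (le_refl m) hmx) h3'
    · rcases List.mem_cons.mp hm with h | hm
      · subst h
        exact ih (max a m) (Or.inl (max_eq_right h2).symm) (max_le h2 (le_refl m)) h3'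
      · exact ih (max a x) (Or.inr hm) (max_le h2 hmx) h3' 

theorem foldl_omin_eq (l : List Int) (m : Int) (hm : m ∈ l)
    (hb : ∀ x ∈ l, m ≤ x) : l.foldl omin none = some m := by
  cases l with
  | nil => cases hm
  | cons y ys =>
    have : omin none y = some y := rfl
    rw [List.foldl_cons, this, foldl_omin_some]
    congr 1
    exact foldl_min_eq_of ys y m (by simpa using List.mem_cons.mp hm)
      (hb y (by simp)) (fun x hx => hb x (by simp [hx]))

theorem foldl_omax_eq (l : List Int) (m : Int) (hm : m ∈ l)
    (hb : ∀ x ∈ l, x ≤ m) : l.foldl omax none = some m := by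
  cases l with
  | nil => cases hm
  | cons y ys =>
    have : omax none y = some y := rfl
    rw [List.foldl_cons, this, foldl_omax_some]
    congr 1
    exact foldl_max_eq_of ys y m (by simpa using List.mem_cons.mp hm)
      (hb y (by simp)) (fun x hx => hb x (by simp [hx]))

-- the loop condition, rewritten as linear bounds (N ≥ 2)
theorem cond_iff (N O q : Int) (hN : 2 ≤ N) :
    PySem.Int.floordiv (O + q) N = q ↔
      (PySem.Int.floordiv (O - N) (N - 1) + 1 ≤ q ∧
       q ≤ PySem.Int.floordiv O (N - 1)) := by
  have hN0 : (0 : Int) < N := by omega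
  have hM : (0 : Int) < N - 1 := by omega
  rw [PySem.Int.floordiv_eq_iff_of_pos hN0]
  constructor
  · rintro ⟨h1, h2⟩
    constructor
    · have := (PySem.Int.floordiv_lt_iff_lt_mul (a := O - N) (b := N - 1) (q := q) hM).mpr
        (by nlinarith)
      omega
    · exact (PySem.Int.le_floordiv_iff_mul_le (a := O) (b := N - 1) (q := q) hM).mpr
        (by nlinarith)
  · rintro ⟨h1, h2⟩
    have hlt : O - N < q * (N - 1) :=
      (PySem.Int.floordiv_lt_iff_lt_mul (a := O - N) (b := N - 1) (q := q) hM).mp (by omega)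
    have hle : q * (N - 1) ≤ O :=
      (PySem.Int.le_floordiv_iff_mul_le (a := O) (b := N - 1) (q := q) hM).mp h2
    constructor
    · nlinarith
    · nlinarith

theorem F_spec : Claim_equal_F := by
  intro N O _ hPre
  unfold Spec_F
  show ([_, _] : List (Option Int)) = _
  rw [show (PySem.List.pyRange 1 (O + 1) 1).foldl (stepA N O) (none, none) =
      ((((PySem.List.pyRange 1 (O + 1) 1).filter
          (fun q => decide (PySem.Int.floordiv (O + q) N = q))).map
          (fun q => O + q)).foldl omin none,
       (((PySem.List.pyRange 1 (O + 1) 1).filter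
          (fun q => decide (PySem.Int.floordiv (O + q) N = q))).map
          (fun q => O + q)).foldl omax none) from foldl_stepA N O _ none none]
  by_cases hO : O < 1
  · rw [PySem.List.pyRange_one_eq_nil (by omega)]
    simp only [List.filter_nil, List.map_nil, List.foldl_nil]
    unfold F_alt
    rw [if_pos (by simp [hO])]
  · rw [not_lt] at hO
    by_cases hN : N < 2
    · -- N = 1 or N < 0 (N = 0 excluded by Pre_): the condition never holds
      have hfilter : (PySem.List.pyRange 1 (O + 1) 1).filter
          (fun q => decide (PySem.Int.floordiv (O + q) N = q)) = [] := by
        apply List.filter_eq_nil_iff.mpr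
        intro q hq
        have hq' := PySem.List.mem_pyRange_one.mp hq
        simp only [decide_eq_true_eq]
        intro hc
        rcases lt_trichotomy N 0 with hNn | hN0 | hNp
        · -- N < 0 : floordiv (O+q) N = floordiv (-(O+q)) (-N) with -N > 0
          rw [show O + q = -(-(O + q)) by ring, show N = -(-N) by ring,
            PySem.Int.floordiv_neg_neg] at hc
          have := (PySem.Int.floordiv_eq_iff_of_pos (a := -(O + q)) (b := -N)
            (q := q) (by omega)).mp hc
          nlinarith [this.1]
        · exact hPre ⟨hN0, hO⟩
        · -- N = 1
          have hN1 : N = 1 := by omega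
          subst hN1
          have := (PySem.Int.floordiv_eq_iff_of_pos (a := O + q) (b := 1)
            (q := q) (by omega)).mp hc
          omega
      rw [hfilter]
      simp only [List.map_nil, List.foldl_nil]
      unfold F_alt
      rw [if_pos (by simp [hN])]
    · rw [not_lt] at hN
      set lo := PySem.Int.floordiv (O - N) (N - 1) + 1 with hlo
      set hi := PySem.Int.floordiv O (N - 1) with hhi
      set q1 := max lo 1 with hq1
      set q2 := min hi O with hq2
      have hmem : ∀ q, q ∈ (PySem.List.pyRange 1 (O + 1) 1).filter
          (fun q => decide (PySem.Int.floordiv (O + q) N = q)) ↔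
          (q1 ≤ q ∧ q ≤ q2) := by
        intro q
        rw [List.mem_filter, PySem.List.mem_pyRange_one, decide_eq_true_eq,
          cond_iff N O q hN]
        omega
      by_cases hqq : q1 > q2
      · have hfilter : (PySem.List.pyRange 1 (O + 1) 1).filter
            (fun q => decide (PySem.Int.floordiv (O + q) N = q)) = [] := by
          apply List.filter_eq_nil_iff.mpr
          intro q hq hc
          have := (hmem q).mp (List.mem_filter.mpr ⟨hq, hc⟩)
          omega
        rw [hfilter]
        simp only [List.map_nil, List.foldl_nil]
        unfold F_alt
        rw [if_neg (by simp; omega)]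
        simp only [← hlo, ← hhi, ← hq1, ← hq2]
        rw [if_pos hqq]
      · rw [not_lt] at hqq
        have hq1mem : O + q1 ∈ ((PySem.List.pyRange 1 (O + 1) 1).filter
            (fun q => decide (PySem.Int.floordiv (O + q) N = q))).map (fun q => O + q) :=
          List.mem_map.mpr ⟨q1, (hmem q1).mpr ⟨le_refl _, hqq⟩, rfl⟩
        have hq2mem : O + q2 ∈ ((PySem.List.pyRange 1 (O + 1) 1).filter
            (fun q => decide (PySem.Int.floordiv (O + q) N = q))).map (fun q => O + q) :=
          List.mem_map.mpr ⟨q2, (hmem q2).mpr ⟨hqq, le_refl _⟩, rfl⟩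
        have hbound : ∀ x ∈ ((PySem.List.pyRange 1 (O + 1) 1).filter
            (fun q => decide (PySem.Int.floordiv (O + q) N = q))).map (fun q => O + q),
            O + q1 ≤ x ∧ x ≤ O + q2 := by
          intro x hx
          rcases List.mem_map.mp hx with ⟨q, hq, rfl⟩
          have := (hmem q).mp hq
          omega
        rw [foldl_omin_eq _ _ hq1mem (fun x hx => (hbound x hx).1),
          foldl_omax_eq _ _ hq2mem (fun x hx => (hbound x hx).2)]
        unfold F_alt
        rw [if_neg (by simp; omega)]
        simp only [← hlo, ← hhi, ← hq1, ← hq2]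
        rw [if_neg (by omega)]
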